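-- pv_equiv track=rewrite | github.com/Hinstein/blum-bit | get_error_list.py | group_errors_by_frequency
-- ===== SOURCE A (Python) =====
-- from collections import Counter, defaultdict
--
-- def group_errors_by_frequency(error_numbers):
--     """
--     根据出现次数对错误号码进行分组，并对组内的序号按大小排序。
--
--     :param error_numbers: 包含所有提取到的错误号码的数组
--     :return: 一个字典，其中键是失败的次数，值是一个列表，包含所有出现该次数的错误号码，且该列表按序号大小排序
--     """
--     # 使用 Counter 统计每个错误号码的出现次数
--     error_counts = Counter(error_numbers)
--
--     # 创建一个默认字典，用于将错误号码按出现次数进行分组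
--     grouped_errors = defaultdict(list)
--
--     for number, count in error_counts.items():
--         grouped_errors[count].append(number)
--
--     # 对每个失败次数的列表内的错误号码进行排序
--     for count in grouped_errors:
--         grouped_errors[count].sort()
--
--     # 将结果转换为普通字典并按失败次数（键）降序排序
--     grouped_errors = dict(sorted(grouped_errors.items(), key=lambda x: x[0], reverse=True))
--
--     return grouped_errors
-- ===== SOURCE B (Python) =====
-- def group_errors_by_frequency(error_numbers):
--     """Sort-and-scan: sort the raw list once, collect run lengths in a single pass
--     (no Counter, no defaultdict, no per-bucket sorts), then order items by count
--     descending."""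
--     xs = sorted(error_numbers)
--     grouped = {}
--     run_val = None
--     run_len = 0
--     for x in xs:
--         if run_len > 0 and x == run_val:
--             run_len += 1
--         else:
--             if run_len > 0:
--                 grouped.setdefault(run_len, []).append(run_val)
--             run_val = x
--             run_len = 1
--     if run_len > 0:
--         grouped.setdefault(run_len, []).append(run_val)
--     return dict(sorted(grouped.items(), key=lambda item: item[0], reverse=True))
-- ===== Notes on version B (the rewrite author's own statement) =====
-- stated objective: alternative
-- what changed: B drops Counter and defaultdict entirely: it sorts the raw list once and does a single run-length scan over it, flushing each completed run (value, length) straight into grouped[length] (buckets come out ascending automatically, so no per-bucket sorts), then orders the items by count descending.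
import Mathlib
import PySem

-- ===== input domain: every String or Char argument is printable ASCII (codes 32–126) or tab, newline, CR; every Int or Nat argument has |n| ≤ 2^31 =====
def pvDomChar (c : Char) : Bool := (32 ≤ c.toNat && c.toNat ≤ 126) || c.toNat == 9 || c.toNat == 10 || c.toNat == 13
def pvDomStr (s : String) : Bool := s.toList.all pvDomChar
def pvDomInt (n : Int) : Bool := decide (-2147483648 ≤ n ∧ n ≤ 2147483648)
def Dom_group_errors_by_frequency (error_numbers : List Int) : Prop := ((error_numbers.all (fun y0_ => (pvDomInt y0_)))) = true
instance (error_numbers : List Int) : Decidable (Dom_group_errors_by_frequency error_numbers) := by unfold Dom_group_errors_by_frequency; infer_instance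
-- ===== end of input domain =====

-- B replaces A's "hash-count with Counter, group, then sort every bucket" with
-- "sort the raw list once and run-length-scan it in a single pass" (objective: alternative).

-- ===== PORT A =====
def group_errors_by_frequency (error_numbers : List Int) : List (Int × List Int) :=
  -- error_counts = Counter(error_numbers)
  let error_counts := PySem.Dict.counter error_numbers
  -- for number, count in error_counts.items(): grouped_errors[count].append(number)
  let grouped := error_counts.items.foldl
    (fun d p => d.modify p.2 [] (fun v => v ++ [p.1])) PySem.Dict.empty
  -- for count in grouped_errors: grouped_errors[count].sort()
  let grouped2 := grouped.keys.foldl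
    (fun d c => d.modify c [] (fun v => PySem.List.sorted v (fun x => x) false)) grouped
  -- dict(sorted(grouped_errors.items(), key=lambda x: x[0], reverse=True))
  PySem.List.sorted grouped2.items (fun p => p.1) true

-- ===== PORT B =====
-- loop body of B's single for-loop (state = (grouped, run_val, run_len)):
-- 'if run_len > 0 and x == run_val: run_len += 1 else: flush pending run; start run (x,1)'
def pvStepB (st : PySem.Dict Int (List Int) × Option Int × Int) (x : Int) :
    PySem.Dict Int (List Int) × Option Int × Int :=
  if st.2.2 > 0 && st.2.1 == some x then (st.1, st.2.1, st.2.2 + 1)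
  else
    ((if st.2.2 > 0 then st.1.modify st.2.2 [] (fun v => v ++ [st.2.1.getD 0]) else st.1),
     some x, 1)

-- the trailing 'if run_len > 0: grouped.setdefault(run_len, []).append(run_val)'
def pvFlushB (st : PySem.Dict Int (List Int) × Option Int × Int) :
    PySem.Dict Int (List Int) :=
  if st.2.2 > 0 then st.1.modify st.2.2 [] (fun v => v ++ [st.2.1.getD 0]) else st.1

def group_errors_by_frequency_alt (error_numbers : List Int) : List (Int × List Int) :=
  -- xs = sorted(error_numbers)
  let xs := PySem.List.sorted error_numbers (fun x => x) false
  -- for x in xs: run-length state machine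
  let st := xs.foldl pvStepB (PySem.Dict.empty, none, 0)
  -- final flush of the last pending run
  let grouped := pvFlushB st
  -- dict(sorted(grouped.items(), key=lambda item: item[0], reverse=True))
  PySem.List.sorted grouped.items (fun p => p.1) true

-- ===== PRECONDITION & SPEC =====
def Spec_group_errors_by_frequency (error_numbers : List Int) (out : List (Int × List Int)) : Prop := out = group_errors_by_frequency_alt error_numbers
instance (error_numbers : List Int) (out : List (Int × List Int)) : Decidable (Spec_group_errors_by_frequency error_numbers out) := by unfold Spec_group_errors_by_frequency; infer_instance

-- ===== CLAIM (what is proved, stated in full; the proofs are below) =====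
def Claim_equal_group_errors_by_frequency : Prop := ∀ (error_numbers : List Int), Dom_group_errors_by_frequency error_numbers → Spec_group_errors_by_frequency error_numbers (group_errors_by_frequency error_numbers)

-- ===== LEMMAS AND PROOFS =====

-- ---- A-side dictionaries (as in the proof of the previous layout) ----

def pvDA (l : List Int) : PySem.Dict Int (List Int) :=
  (PySem.Dict.counter l).items.foldl
    (fun d p => d.modify p.2 [] (fun v => v ++ [p.1])) PySem.Dict.empty

def pvDA2 (l : List Int) : PySem.Dict Int (List Int) :=
  (pvDA l).keys.foldl
    (fun d c => d.modify c [] (fun v => PySem.List.sorted v (fun x => x) false)) (pvDA l)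

-- reference dictionary: fold the ascending distinct numbers into grouped[count]
def pvDB (l : List Int) : PySem.Dict Int (List Int) :=
  (PySem.List.sorted (PySem.Dict.counter l).keys (fun x => x) false).foldl
    (fun d n => d.modify ((PySem.Dict.counter l).getD n 0) [] (fun v => v ++ [n]))
    PySem.Dict.empty

def pvGroup (l : List Int) (c : Int) : List Int :=
  PySem.List.sorted ((PySem.Set.ofList l).filter
    (fun n => ((List.count n l : Int)) == c)) (fun x => x) false

theorem dA_getD (l : List Int) (c : Int) :
    (pvDA l).getD c [] =
    (PySem.Set.ofList l).filter (fun n => ((List.count n l : Int)) == c) := by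
  have h : pvDA l =
      (((PySem.Dict.counter l).items.map Prod.swap).foldl
        (fun d q => d.modify q.1 [] (fun v => v ++ [q.2])) PySem.Dict.empty) := by
    rw [pvDA, List.foldl_map]; simp [Prod.swap]
  rw [h, PySem.Dict.getD_foldl_modify_append, PySem.Dict.getD_empty,
      PySem.Dict.items_counter]
  simp [List.filter_map, Function.comp_def]

theorem filter_sorted_id (xs : List Int) (P : Int → Bool) :
    (PySem.List.sorted xs (fun x => x) false).filter P =
      PySem.List.sorted (xs.filter P) (fun x => x) false := by
  refine (PySem.List.sorted_id_eq_of_perm_of_pairwise _ _ ?_ ?_).symm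
  · exact (PySem.List.sorted_perm xs (fun x => x) false).filter P
  · exact (PySem.List.sorted_pairwise xs (fun x => x)).filter P

theorem set_update_self (s : List Int) : PySem.Set.update s s = s := by
  rw [PySem.Set.update_eq_append_filter]
  have h : (PySem.Set.ofList s).filter (fun y => !(PySem.Set.contains s y)) = [] := by
    apply List.filter_eq_nil_iff.mpr
    intro y hy
    have : y ∈ s := (PySem.Set.mem_ofList s y).mp hy
    simp [this]
  rw [h, List.append_nil]

theorem dA_keys (l : List Int) :
    (pvDA l).keys =
    PySem.Set.ofList ((PySem.Set.ofList l).map (fun n => ((List.count n l : Int)))) := by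
  rw [pvDA, PySem.Dict.keys_foldl_modify_key _ (fun p : Int × Int => p.2) []
        (fun _ p => (fun v => v ++ [p.1]))]
  simp only [PySem.Dict.items_counter, List.map_map, Function.comp_def,
    PySem.Dict.keys_empty, PySem.Set.update_nil_left]

theorem dB_getD (l : List Int) (c : Int) :
    (pvDB l).getD c [] = pvGroup l c := by
  have h : pvDB l =
      (((PySem.List.sorted (PySem.Dict.counter l).keys (fun x => x) false).map
          (fun n => ((PySem.Dict.counter l).getD n 0, n))).foldl
        (fun d q => d.modify q.1 [] (fun v => v ++ [q.2])) PySem.Dict.empty) := by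
    rw [pvDB, List.foldl_map]
  rw [h, PySem.Dict.getD_foldl_modify_append, PySem.Dict.getD_empty]
  simp only [List.filter_map, List.map_map, Function.comp_def, PySem.Dict.getD_counter,
    PySem.Dict.keys_counter, List.map_id', List.nil_append]
  exact filter_sorted_id _ _

theorem dB_keys (l : List Int) :
    (pvDB l).keys =
    PySem.Set.ofList ((PySem.List.sorted (PySem.Set.ofList l) (fun x => x) false).map
      (fun n => ((List.count n l : Int)))) := by
  rw [pvDB, PySem.Dict.keys_foldl_modify_key _ (fun n => (PySem.Dict.counter l).getD n 0) []
        (fun _ n => (fun v => v ++ [n]))]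
  simp [PySem.Dict.getD_counter, PySem.Dict.keys_counter, PySem.Set.update_nil_left]

theorem foldl_modify_keys_getD (f : List Int → List Int) (ks : List Int)
    (d : PySem.Dict Int (List Int)) (c : Int) (hnd : ks.Nodup) :
    (ks.foldl (fun d k => d.modify k [] f) d).getD c [] =
      if c ∈ ks then f (d.getD c []) else d.getD c [] := by
  induction ks generalizing d with
  | nil => simp
  | cons a t ih =>
    simp only [List.nodup_cons] at hnd
    simp only [List.foldl_cons, ih _ hnd.2, PySem.Dict.getD_modify, List.mem_cons]
    by_cases hct : c ∈ t
    · have : c ≠ a := fun h => hnd.1 (h ▸ hct)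
      simp [hct, this]
    · by_cases hca : c = a <;> simp [hct, hca, hnd.1]

theorem pvDA_keys_nodup (l : List Int) : (pvDA l).keys.Nodup := by
  rw [dA_keys]; exact PySem.Set.nodup_ofList _

theorem pvDB_keys_nodup (l : List Int) : (pvDB l).keys.Nodup := by
  rw [dB_keys]; exact PySem.Set.nodup_ofList _

theorem pvDA2_keys (l : List Int) : (pvDA2 l).keys = (pvDA l).keys := by
  rw [pvDA2, PySem.Dict.keys_foldl_modify_key _ (fun c => c) []
        (fun _ _ => (fun v => PySem.List.sorted v (fun x => x) false))]
  rw [show List.map (fun c => c) (pvDA l).keys = (pvDA l).keys from List.map_id _]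
  exact set_update_self _

theorem pvDA2_items (l : List Int) :
    (pvDA2 l).items = (pvDA l).keys.map (fun c => (c, pvGroup l c)) := by
  rw [PySem.Dict.items_eq_map_keys _ (by rw [pvDA2_keys]; exact pvDA_keys_nodup l) [],
      pvDA2_keys]
  apply List.map_congr_left
  intro c hc
  have h2 : (pvDA2 l).getD c [] =
      if c ∈ (pvDA l).keys then PySem.List.sorted ((pvDA l).getD c []) (fun x => x) false
      else (pvDA l).getD c [] :=
    foldl_modify_keys_getD _ _ _ _ (pvDA_keys_nodup l)
  rw [h2, if_pos hc, dA_getD]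
  rfl

theorem pvDB_items (l : List Int) :
    (pvDB l).items = (pvDB l).keys.map (fun c => (c, pvGroup l c)) := by
  rw [PySem.Dict.items_eq_map_keys _ (pvDB_keys_nodup l) []]
  apply List.map_congr_left
  intro c _
  rw [dB_getD]

theorem pv_keys_perm (l : List Int) : (pvDA l).keys.Perm (pvDB l).keys := by
  have hA := pvDA_keys_nodup l
  have hB := pvDB_keys_nodup l
  rw [List.perm_ext_iff_of_nodup hA hB]
  rw [dA_keys, dB_keys]
  intro a
  simp only [PySem.Set.mem_ofList, List.mem_map]
  constructor
  · rintro ⟨n, hn, rfl⟩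
    exact ⟨n, (PySem.List.mem_sorted _ _ _ _).mpr ((PySem.Set.mem_ofList _ _).mpr hn), rfl⟩
  · rintro ⟨n, hn, rfl⟩
    exact ⟨n, (PySem.Set.mem_ofList _ _).mp ((PySem.List.mem_sorted _ _ _ _).mp hn), rfl⟩

theorem pv_items_perm (l : List Int) : (pvDA2 l).items.Perm (pvDB l).items := by
  rw [pvDA2_items, pvDB_items]
  exact (pv_keys_perm l).map _

theorem pv_main (l : List Int) :
    PySem.List.sorted (pvDA2 l).items (fun p => p.1) true =
      PySem.List.sorted (pvDB l).items (fun p => p.1) true := by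
  have hperm : (PySem.List.sorted (pvDB l).items (fun p => p.1) true).Perm (pvDA2 l).items :=
    (PySem.List.sorted_perm _ _ _).trans (pv_items_perm l).symm
  have hnodup : ((PySem.List.sorted (pvDB l).items (fun p => p.1) true).map
      (fun p : Int × List Int => p.1)).Nodup := by
    have h1 : ((pvDB l).items.map (fun p : Int × List Int => p.1)).Nodup := by
      rw [pvDB_items, List.map_map]
      simpa [Function.comp_def] using pvDB_keys_nodup l
    exact (((PySem.List.sorted_perm _ _ _).map _).nodup_iff).mpr h1
  have hne : (PySem.List.sorted (pvDB l).items (fun p => p.1) true).Pairwise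
      (fun a b => a.1 ≠ b.1) := by
    rw [List.Nodup, List.pairwise_map] at hnodup
    exact hnodup
  have hgt : (PySem.List.sorted (pvDB l).items (fun p => p.1) true).Pairwise
      (fun a b : Int × List Int => b.1 < a.1) :=
    ((PySem.List.sorted_pairwise_rev (pvDB l).items (fun p => p.1)).and hne).imp
      (fun h => lt_of_le_of_ne h.1 h.2.symm)
  exact PySem.List.sorted_rev_eq_of_perm_of_pairwise_gt _ _ _ hperm hgt

-- ---- B-side: the run-length scan computes the run-length encoding ----

def pvRle : List Int → List (Int × Int)
  | [] => []
  | x :: t =>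
    match pvRle t with
    | [] => [(x, 1)]
    | (v, c) :: r => if x = v then (x, c + 1) :: r else (x, 1) :: (v, c) :: r

theorem pvRle_cons (x : Int) (t : List Int) :
    pvRle (x :: t) = match pvRle t with
      | [] => [(x, 1)]
      | (v, c) :: r => if x = v then (x, c + 1) :: r else (x, 1) :: (v, c) :: r := rfl

def pvMerge (v : Int) (c : Int) : List (Int × Int) → List (Int × Int)
  | [] => [(v, c)]
  | (v', c') :: r => if v = v' then (v', c' + c) :: r else (v, c) :: (v', c') :: r

theorem pvMerge_one (x : Int) (t : List Int) : pvMerge x 1 (pvRle t) = pvRle (x :: t) := by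
  rw [pvRle_cons]
  cases h : pvRle t with
  | nil => simp [pvMerge]
  | cons p r =>
    obtain ⟨v, c⟩ := p
    by_cases hx : x = v <;> simp [pvMerge, hx]

theorem pvMerge_step (x c : Int) (t : List Int) :
    pvMerge x c (pvRle (x :: t)) = pvMerge x (c + 1) (pvRle t) := by
  rw [pvRle_cons]
  cases h : pvRle t with
  | nil =>
    simp [pvMerge]
    omega
  | cons p r =>
    obtain ⟨v, c'⟩ := p
    by_cases hx : x = v
    · subst hx
      simp [pvMerge]
      omega
    · simp [pvMerge, hx]
      omega

theorem pvRle_cons_fst (x : Int) (t : List Int) :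
    ∃ c r, pvRle (x :: t) = (x, c) :: r := by
  rw [pvRle_cons]
  cases h : pvRle t with
  | nil => exact ⟨1, [], rfl⟩
  | cons p r =>
    obtain ⟨v, c⟩ := p
    by_cases hx : x = v
    · exact ⟨c + 1, r, by simp [hx]⟩
    · exact ⟨1, (v, c) :: r, by simp [hx]⟩

theorem pvLG (xs : List Int) : ∀ (d : PySem.Dict Int (List Int)) (v c : Int), 0 < c →
    pvFlushB (xs.foldl pvStepB (d, some v, c)) =
      (pvMerge v c (pvRle xs)).foldl
        (fun d p => d.modify p.2 [] (fun w => w ++ [p.1])) d := by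
  induction xs with
  | nil =>
    intro d v c hc
    simp [pvFlushB, pvMerge, pvRle, hc]
  | cons x t ih =>
    intro d v c hc
    by_cases hx : v = x
    · subst hx
      have hstep : pvStepB (d, some v, c) v = (d, some v, c + 1) := by
        simp [pvStepB, hc]
      rw [List.foldl_cons, hstep, ih d v (c + 1) (by omega), pvMerge_step]
    · have hstep : pvStepB (d, some v, c) x =
          (d.modify c [] (fun w => w ++ [v]), some x, 1) := by
        simp [pvStepB, hc, hx]
      rw [List.foldl_cons, hstep, ih _ x 1 (by omega), pvMerge_one]
      obtain ⟨c', r, hr⟩ := pvRle_cons_fst x t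
      rw [hr]
      simp [pvMerge, hx]

theorem pvLG_init (xs : List Int) (d : PySem.Dict Int (List Int)) :
    pvFlushB (xs.foldl pvStepB (d, none, 0)) =
      (pvRle xs).foldl (fun d p => d.modify p.2 [] (fun w => w ++ [p.1])) d := by
  cases xs with
  | nil => simp [pvFlushB, pvRle]
  | cons x t =>
    have hstep : pvStepB (d, none, 0) x = (d, some x, 1) := by
      simp [pvStepB]
    rw [List.foldl_cons, hstep, pvLG t d x 1 (by omega), pvMerge_one]

-- run-length encoding of an ascending list = (distinct values, their counts)
theorem pvRle_sorted : ∀ (xs : List Int), xs.Pairwise (· ≤ ·) →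
    pvRle xs = (PySem.Set.ofList xs).map (fun n => (n, (xs.count n : Int)))
  | [], _ => rfl
  | [x], _ => by
    simp [pvRle, PySem.Set.ofList_cons, PySem.Set.ofList_nil, PySem.Set.discard]
  | x :: y :: t, hp => by
    have hp' : (y :: t).Pairwise (· ≤ ·) := hp.tail
    have ih := pvRle_sorted (y :: t) hp'
    have hxy : x ≤ y := hp.rel_head (by simp)
    by_cases hx : x = y
    · subst hx
      have hof : PySem.Set.ofList (x :: x :: t) = PySem.Set.ofList (x :: t) := by
        simp [PySem.Set.ofList_cons, PySem.Set.discard, List.filter_filter]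
      obtain ⟨c, r, hr⟩ := pvRle_cons_fst x t
      have hhd : pvRle (x :: x :: t) = (x, c + 1) :: r := by
        rw [pvRle_cons, hr]
        simp
      rw [hhd, hof]
      rw [hr] at ih
      rw [PySem.Set.ofList_cons] at ih ⊢
      simp only [List.map_cons] at ih ⊢
      obtain ⟨ihh, iht⟩ := List.cons_eq_cons.mp ih
      have hc : c = ((x :: t).count x : Int) := (Prod.mk.injEq _ _ _ _ ▸ ihh).2
      rw [List.cons_eq_cons]
      refine ⟨?_, ?_⟩
      · rw [Prod.mk.injEq]
        refine ⟨rfl, ?_⟩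
        rw [hc]
        have hcnt : (x :: x :: t).count x = (x :: t).count x + 1 :=
          List.count_cons_self ..
        rw [hcnt]
        push_cast
        ring
      · rw [iht]
        apply List.map_congr_left
        intro n hn
        have hne : n ≠ x := ((PySem.Set.mem_discard _ _ _).mp hn).2
        simp [Ne.symm hne]
    · have hxlt : x < y := lt_of_le_of_ne hxy hx
      have hxnot : x ∉ (y :: t) := by
        intro hmem
        rcases List.mem_cons.mp hmem with h | h
        · exact hx h
        · exact absurd ((List.pairwise_cons.mp hp').1 x h) (not_le.mpr hxlt)
      obtain ⟨c, r, hr⟩ := pvRle_cons_fst y t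
      have hhd : pvRle (x :: y :: t) = (x, 1) :: pvRle (y :: t) := by
        rw [pvRle_cons (x := x), hr]
        simp [hx]
      rw [hhd, ih]
      have hof : PySem.Set.ofList (x :: y :: t) = x :: PySem.Set.ofList (y :: t) := by
        rw [PySem.Set.ofList_cons]
        congr 1
        rw [PySem.Set.discard]
        apply List.filter_eq_self.mpr
        intro a ha
        have ha2 : a ∈ (y :: t) := (PySem.Set.mem_ofList _ _).mp ha
        have hne : x ≠ a := by intro h; exact hxnot (h ▸ ha2)
        simp [Ne.symm hne]
      rw [hof, List.map_cons, List.cons_eq_cons]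
      refine ⟨?_, ?_⟩
      · rw [Prod.mk.injEq]
        exact ⟨rfl, by simp [List.count_cons_self, List.count_eq_zero_of_not_mem hxnot]⟩
      · apply List.map_congr_left
        intro n hn
        have hmem : n ∈ (y :: t) := (PySem.Set.mem_ofList _ _).mp hn
        have hne : n ≠ x := by intro h; exact hxnot (h ▸ hmem)
        simp [List.count_cons, Ne.symm hne]

-- distinct values of sorted(l) listed in order = sorted(set(l))
theorem pvOfList_pairwise_lt (xs : List Int) (h : xs.Pairwise (· ≤ ·)) :
    (PySem.Set.ofList xs).Pairwise (· < ·) := by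
  induction xs with
  | nil => simp [PySem.Set.ofList_nil]
  | cons x t ih =>
    rw [PySem.Set.ofList_cons]
    refine List.pairwise_cons.mpr ⟨?_, ?_⟩
    · intro b hb
      have hmem := (PySem.Set.mem_discard _ _ _).mp hb
      have hle : x ≤ b := (List.pairwise_cons.mp h).1 b ((PySem.Set.mem_ofList _ _).mp hmem.1)
      exact lt_of_le_of_ne hle (Ne.symm hmem.2)
    · rw [PySem.Set.discard]
      exact (ih h.tail).filter _

theorem pv_ofList_sorted (l : List Int) :
    PySem.Set.ofList (PySem.List.sorted l (fun x => x) false) =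
      PySem.List.sorted (PySem.Set.ofList l) (fun x => x) false := by
  refine (PySem.List.sorted_eq_of_perm_of_pairwise_lt _ _ _ ?_ ?_).symm
  · rw [List.perm_ext_iff_of_nodup (PySem.Set.nodup_ofList _) (PySem.Set.nodup_ofList _)]
    intro a
    rw [PySem.Set.mem_ofList, PySem.Set.mem_ofList, PySem.List.mem_sorted]
  · exact pvOfList_pairwise_lt _ (PySem.List.sorted_pairwise l (fun x => x))

-- B's grouped dictionary is exactly pvDB
theorem pvB_dict (l : List Int) :
    pvFlushB ((PySem.List.sorted l (fun x => x) false).foldl pvStepB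
      (PySem.Dict.empty, none, 0)) = pvDB l := by
  rw [pvLG_init, pvRle_sorted _ (PySem.List.sorted_pairwise l (fun x => x)),
      pv_ofList_sorted, List.foldl_map, pvDB]
  simp only [PySem.Dict.getD_counter, PySem.Dict.keys_counter]
  apply PySem.List.foldl_congr_mem
  intro acc x hx
  have : (PySem.List.sorted l (fun x => x) false).count x = l.count x :=
    (PySem.List.sorted_perm l (fun x => x) false).count_eq x
  simp [this]

theorem pvB_eq (l : List Int) :
    group_errors_by_frequency_alt l =
      PySem.List.sorted (pvDB l).items (fun p => p.1) true := by
  show PySem.List.sorted (pvFlushB _).items _ _ = _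
  rw [pvB_dict]

-- ===== VERDICT (by name: the statement is the Claim_ definition above) =====
theorem group_errors_by_frequency_spec : Claim_equal_group_errors_by_frequency := by
  intro l _
  show group_errors_by_frequency l = group_errors_by_frequency_alt l
  rw [pvB_eq]
  exact pv_main l
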